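-- pv_equiv track=rewrite | github.com/lfsoftware13/ProgramFix | experiment/parse_xy_util.py | join_gap_in_token_list
-- ===== SOURCE A (Python) =====
-- def join_gap_in_token_list(split_tokens, gap_token):
--     part_tokens = []
--     part_tokens += split_tokens[0]
--     for s in split_tokens[1:]:
--         if gap_token is not None:
--             part_tokens += [gap_token]
--         part_tokens += s
--     return part_tokens
-- ===== SOURCE B (Python) =====
-- def join_gap_in_token_list(split_tokens, gap_token):
--     if gap_token is None:
--         return [t for s in split_tokens for t in s]
--     prefixed = [t for s in split_tokens for t in [gap_token] + list(s)]
--     return prefixed[1:]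
-- ===== Notes on version B (the rewrite author's own statement) =====
-- stated objective: alternative
-- what changed: B uses the classic join idiom: when a gap token is given, it uniformly prefixes every sublist with the gap token, flattens, and strips the leading separator with a slice (plain flatten when gap_token is None), instead of A's accumulating loop that branches to insert the separator between sublists.
import Mathlib
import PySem

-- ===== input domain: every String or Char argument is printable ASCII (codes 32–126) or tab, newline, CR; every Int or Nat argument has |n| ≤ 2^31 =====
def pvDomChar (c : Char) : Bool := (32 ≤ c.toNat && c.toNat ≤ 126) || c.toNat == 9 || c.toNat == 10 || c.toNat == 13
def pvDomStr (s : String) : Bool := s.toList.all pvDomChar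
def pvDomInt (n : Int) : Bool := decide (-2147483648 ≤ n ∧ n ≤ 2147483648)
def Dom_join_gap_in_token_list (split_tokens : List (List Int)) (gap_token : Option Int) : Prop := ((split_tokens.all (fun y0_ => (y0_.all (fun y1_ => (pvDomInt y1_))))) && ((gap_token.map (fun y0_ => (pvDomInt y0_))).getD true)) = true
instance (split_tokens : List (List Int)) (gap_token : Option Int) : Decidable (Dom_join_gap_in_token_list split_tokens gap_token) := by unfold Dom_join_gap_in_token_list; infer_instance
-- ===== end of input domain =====

-- B joins with the uniform-prefix-then-strip idiom (prefix every sublist with the gap, flatten, drop the leading gap) instead of A's accumulating loop; objective: alternative, same cost.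


-- ===== PORT A =====
-- Port of A: single accumulator; part_tokens += split_tokens[0] (IndexError on [] excluded by Pre_),
-- then for each later sublist optionally append the gap token, then the sublist.
def join_gap_in_token_list (split_tokens : List (List Int)) (gap_token : Option Int) : List Int :=
  match split_tokens with
  | [] => []  -- Python raises IndexError here; excluded by Pre_
  | first :: rest =>
    rest.foldl (fun part_tokens s =>
      (if gap_token.isSome then part_tokens ++ [gap_token.get!] else part_tokens) ++ s)
      ([] ++ first)

-- ===== PORT B =====
-- Port of B: if gap is None, plain flatten comprehension; otherwise prefix every sublist
-- with the gap token, flatten, and take the slice [1:] (drop the leading separator).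
def join_gap_in_token_list_alt (split_tokens : List (List Int)) (gap_token : Option Int) : List Int :=
  match gap_token with
  | none => split_tokens.flatMap (fun s => s)
  | some x => (split_tokens.flatMap (fun s => [x] ++ s)).drop 1

-- ===== PRECONDITION & SPEC =====
-- Pre_ excludes only the empty list, on which Python A raises IndexError at split_tokens[0].
def Pre_join_gap_in_token_list (split_tokens : List (List Int)) (gap_token : Option Int) : Prop := split_tokens ≠ []
instance (split_tokens : List (List Int)) (gap_token : Option Int) : Decidable (Pre_join_gap_in_token_list split_tokens gap_token) := by unfold Pre_join_gap_in_token_list; infer_instance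
def pvWitness_join_gap_in_token_list : List (List Int) × Option Int := ([[1, 2], [], [3]], some 0)

def Spec_join_gap_in_token_list (split_tokens : List (List Int)) (gap_token : Option Int) (out : List Int) : Prop := out = join_gap_in_token_list_alt split_tokens gap_token
instance (split_tokens : List (List Int)) (gap_token : Option Int) (out : List Int) : Decidable (Spec_join_gap_in_token_list split_tokens gap_token out) := by unfold Spec_join_gap_in_token_list; infer_instance

-- ===== CLAIM (what is proved, stated in full; the proofs are below) =====
def Claim_equal_join_gap_in_token_list : Prop := ∀ (split_tokens : List (List Int)) (gap_token : Option Int), Dom_join_gap_in_token_list split_tokens gap_token → Pre_join_gap_in_token_list split_tokens gap_token → Spec_join_gap_in_token_list split_tokens gap_token (join_gap_in_token_list split_tokens gap_token)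
-- ===== LEMMAS AND PROOFS =====
-- A's accumulator, gap absent: folding append over rest extends acc by rest's flatten.
theorem pv_fold_none (rest : List (List Int)) (acc : List Int) :
    rest.foldl (fun p s => p ++ s) acc = acc ++ rest.flatMap (fun s => s) := by
  induction rest generalizing acc with
  | nil => simp
  | cons h t ih => simp [ih]

-- A's accumulator, gap = x: each step appends [x] ++ s, so the fold extends acc by rest's gap-prefixed flatten.
theorem pv_fold_some (x : Int) (rest : List (List Int)) (acc : List Int) :
    rest.foldl (fun p s => p ++ [x] ++ s) acc = acc ++ rest.flatMap (fun s => [x] ++ s) := by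
  induction rest generalizing acc with
  | nil => simp
  | cons h t ih =>
    rw [List.foldl_cons, ih]
    simp

-- ===== VERDICT (by name: the statement is the Claim_ definition above) =====
theorem join_gap_in_token_list_spec : Claim_equal_join_gap_in_token_list := by
  intro st g _ hpre
  unfold Spec_join_gap_in_token_list join_gap_in_token_list join_gap_in_token_list_alt
  match st with
  | [] => exact absurd rfl hpre
  | first :: rest =>
    cases g with
    | none =>
      simp only [Option.isSome_none, Bool.false_eq_true, if_false]
      simp [pv_fold_none]
    | some x =>
      simp only [Option.isSome_some, if_true, Option.get!_some]
      rw [pv_fold_some]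
      simp
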